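-- pv_equiv track=rewrite | github.com/Elias0419/time_tracker | time_tracker.py | _subsequence_gap
-- ===== SOURCE A (Python) =====
-- def _subsequence_gap(q: str, s: str) -> int | None:
--     if not q:
--         return 0
--     i = 0
--     last = -1
--     gap_sum = 0
--     for ch in q:
--         i = s.find(ch, i)
--         if i == -1:
--             return None
--         if last != -1:
--             gap_sum += (i - last - 1)
--         last = i
--         i += 1
--     return gap_sum
-- ===== SOURCE B (Python) =====
-- def _subsequence_gap(q: str, s: str) -> int | None:
--     # Single left-to-right scan over s with an iterator over q (two-pointer);
--     # the total gap is recovered from the endpoints: last - first - (len(q) - 1).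
--     if not q:
--         return 0
--     it = iter(q)
--     target = next(it)
--     first = None
--     for idx, ch in enumerate(s):
--         if ch == target:
--             if first is None:
--                 first = idx
--             target = next(it, None)
--             if target is None:
--                 return idx - first - (len(q) - 1)
--     return None
-- ===== Notes on version B (the rewrite author's own statement) =====
-- stated objective: faster
-- what changed: Replaces the per-character str.find jumps with incremental gap accumulation by one flat scan over s advancing a pointer into q, computing the answer in closed form from the endpoints as last - first - (len(q) - 1); constant-factor faster (no repeated C-level find calls / Python-level bookkeeping per query char).
import Mathlib
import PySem

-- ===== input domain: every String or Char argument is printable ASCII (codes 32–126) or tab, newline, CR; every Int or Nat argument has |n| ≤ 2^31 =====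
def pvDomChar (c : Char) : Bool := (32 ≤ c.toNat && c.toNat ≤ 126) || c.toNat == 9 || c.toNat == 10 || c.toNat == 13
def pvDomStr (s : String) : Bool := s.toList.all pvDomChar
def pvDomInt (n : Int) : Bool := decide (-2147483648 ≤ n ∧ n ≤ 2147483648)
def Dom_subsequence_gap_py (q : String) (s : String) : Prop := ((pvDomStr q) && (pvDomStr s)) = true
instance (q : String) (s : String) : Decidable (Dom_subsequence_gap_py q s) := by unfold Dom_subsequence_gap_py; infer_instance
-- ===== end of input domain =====

-- B replaces A's repeated str.find jumps by one flat scan over s with a pointer into q,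
-- returning last - first - (len(q) - 1) in closed form (alternative decomposition, same results).


-- ===== PORT A =====
-- the 'for ch in q' loop with state (i, last, gap_sum); s.find(ch, i) is PySem.Chars.findFrom
def pvLoopA (qs : List Char) (s : List Char) (i : Int) (last : Int) (gap : Int) : Option Int :=
  match qs with
  | [] => some gap
  | ch :: rest =>
    let i' := PySem.Chars.findFrom s [ch] i none
    if i' = -1 then none
    else pvLoopA rest s (i' + 1) i' (if last ≠ -1 then gap + (i' - last - 1) else gap)

def subsequence_gap_py (q : String) (s : String) : Option Int :=
  if q.toList = [] then some 0
  else pvLoopA q.toList s.toList 0 (-1) 0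

-- ===== PORT B =====
-- the 'for idx, ch in enumerate(s)' loop; target/rest of the q-iterator, first : Option
def pvLoopB (t : List Char) (idx : Int) (target : Char) (rq : List Char)
    (first : Option Int) (qlen : Int) : Option Int :=
  match t with
  | [] => none
  | c :: cs =>
    if c = target then
      let first' := first.getD idx
      match rq with
      | [] => some (idx - first' - (qlen - 1))
      | t' :: rq' => pvLoopB cs (idx + 1) t' rq' (some first') qlen
    else pvLoopB cs (idx + 1) target rq first qlen

def subsequence_gap_py_alt (q : String) (s : String) : Option Int :=
  match q.toList with
  | [] => some 0
  | c :: qs => pvLoopB s.toList 0 c qs none (PySem.Str.len q)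

-- ===== PRECONDITION & SPEC =====
def Spec_subsequence_gap_py (q : String) (s : String) (out : Option Int) : Prop := out = subsequence_gap_py_alt q s
instance (q : String) (s : String) (out : Option Int) : Decidable (Spec_subsequence_gap_py q s out) := by unfold Spec_subsequence_gap_py; infer_instance

-- ===== CLAIM (what is proved, stated in full; the proofs are below) =====
def Claim_equal_subsequence_gap_py : Prop := ∀ (q : String) (s : String), Dom_subsequence_gap_py q s → Spec_subsequence_gap_py q s (subsequence_gap_py q s)

-- ===== LEMMAS AND PROOFS =====

-- one unfolding of find.go on a cons cell, for a single-character pattern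
lemma pv_go_cons (c x : Char) (xs : List Char) (k : Nat) :
    PySem.Chars.find.go [c] (x :: xs) k =
      if c == x then (k : Int) else PySem.Chars.find.go [c] xs (k + 1) := by
  rw [PySem.Chars.find.go.eq_def]; simp [List.isPrefixOf]

-- find.go for a single-character pattern is findIdx? shifted by the running counter
lemma pv_find_go_single (c : Char) (t : List Char) (k : Nat) :
    PySem.Chars.find.go [c] t k =
      (match t.findIdx? (· = c) with | none => -1 | some p => ((k + p : Nat) : Int)) := by
  induction t generalizing k with
  | nil => rw [PySem.Chars.find.go.eq_def]; simp
  | cons x xs ih =>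
    rw [pv_go_cons]
    by_cases hx : x = c
    · subst hx
      rw [if_pos (by simp)]
      simp [List.findIdx?_cons]
    · have hbe : (c == x) = false := beq_eq_false_iff_ne.mpr (Ne.symm hx)
      rw [hbe]
      simp only [Bool.false_eq_true, if_false, ih, List.findIdx?_cons, decide_eq_true_eq,
        if_neg hx]
      cases h : xs.findIdx? (· = c) with
      | none => simp
      | some p =>
        simp only [Option.map_some]
        congr 1
        omega

lemma pv_find_single (c : Char) (t : List Char) :
    PySem.Chars.find t [c] =
      (match t.findIdx? (· = c) with | none => -1 | some p => (p : Int)) := by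
  have h := pv_find_go_single c t 0
  simp only [PySem.Chars.find] at h ⊢
  rw [h]
  cases t.findIdx? (· = c) <;> simp

-- findFrom for a single character, in terms of findIdx? on the dropped suffix
lemma pv_findFrom_single (s : List Char) (c : Char) (k : Nat) (hk : k ≤ s.length) :
    PySem.Chars.findFrom s [c] (k : Int) none =
      (match (s.drop k).findIdx? (· = c) with | none => -1 | some p => ((k + p : Nat) : Int)) := by
  rw [PySem.Chars.findFrom_natCast s [c] k hk, pv_find_single]
  cases h : (s.drop k).findIdx? (· = c) with
  | none => simp
  | some p =>
    simp only []
    rw [if_neg (show ¬((p : Int) = -1) by omega)]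
    push_cast; ring

-- one A-iteration, rewritten through findIdx?
lemma pv_loopA_step (c : Char) (qs : List Char) (s : List Char) (k : Nat) (hk : k ≤ s.length)
    (last gap : Int) :
    pvLoopA (c :: qs) s (k : Int) last gap =
      (match (s.drop k).findIdx? (· = c) with
       | none => none
       | some p =>
         pvLoopA qs s (((k + p : Nat) : Int) + 1) ((k + p : Nat))
           (if last ≠ -1 then gap + (((k + p : Nat) : Int) - last - 1) else gap)) := by
  rw [pvLoopA, pv_findFrom_single s c k hk]
  cases h : (s.drop k).findIdx? (· = c) with
  | none => simp
  | some p =>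
    simp only []
    rw [if_neg (show ¬(((k + p : Nat) : Int) = -1) by omega)]

-- B skips non-matching characters until the next occurrence of the target
lemma pv_loopB_step (t : List Char) (idx : Int) (c : Char) (rq : List Char)
    (first : Option Int) (qlen : Int) :
    pvLoopB t idx c rq first qlen =
      (match t.findIdx? (· = c) with
       | none => none
       | some p =>
         let first' := first.getD (idx + p)
         match rq with
         | [] => some ((idx + p) - first' - (qlen - 1))
         | t' :: rq' => pvLoopB (t.drop (p + 1)) (idx + p + 1) t' rq' (some first') qlen) := by
  induction t generalizing idx first with
  | nil => simp [pvLoopB]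
  | cons x xs ih =>
    by_cases hx : x = c
    · subst hx
      simp only [pvLoopB, List.findIdx?_cons, decide_true, if_pos trivial]
      cases rq <;> simp
    · rw [pvLoopB, if_neg hx, ih]
      simp only [List.findIdx?_cons, decide_eq_true_eq, if_neg hx]
      cases h : xs.findIdx? (· = c) with
      | none => simp
      | some p =>
        simp only [Option.map_some]
        have h1 : idx + 1 + (p : Int) = idx + ((p : Nat) + 1 : Nat) := by push_cast; ring
        have h2 : idx + 1 + (p : Int) + 1 = idx + ((p : Nat) + 1 : Nat) + 1 := by push_cast; ring
        cases rq <;> simp [h1]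

lemma pv_findIdx?_lt (c : Char) (t : List Char) (p : Nat) (h : t.findIdx? (· = c) = some p) :
    p < t.length := by
  rw [List.findIdx?_eq_some_iff_findIdx_eq] at h; exact h.1

-- main invariant: A's (i = k, last = k-1, gap) state agrees with B's scan of s.drop k
lemma pv_main (qs : List Char) (c : Char) (s : List Char) (k : Nat) (hk : k ≤ s.length)
    (first : Option Int) (qlen gap : Int)
    (hinv : (first = none ∧ k = 0 ∧ gap = 0 ∧ qlen = ((qs.length : Int) + 1)) ∨
            (∃ f0, first = some f0 ∧ 1 ≤ k ∧
              gap = ((k : Int) - 1) - f0 - (qlen - (qs.length : Int) - 2))) :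
    pvLoopA (c :: qs) s (k : Int) ((k : Int) - 1) gap =
      pvLoopB (s.drop k) (k : Int) c qs first qlen := by
  induction qs generalizing c k first gap with
  | nil =>
    rw [pv_loopA_step c [] s k hk, pv_loopB_step]
    cases h : (s.drop k).findIdx? (· = c) with
    | none => rfl
    | some p =>
      simp only [pvLoopA]
      rcases hinv with ⟨hf, hk0, hg, hq⟩ | ⟨f0, hf, hk1, hg⟩
      · rw [if_neg (show ¬((k : Int) - 1 ≠ -1) by omega)]
        subst hf
        simp only [Option.getD_none]
        congr 1
        push_cast [List.length_nil] at hq ⊢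
        omega
      · rw [if_pos (show ((k : Int) - 1 ≠ -1) by omega)]
        subst hf
        simp only [Option.getD_some]
        congr 1
        push_cast [List.length_nil] at hg ⊢
        omega
  | cons t' qs' ih =>
    rw [pv_loopA_step c (t' :: qs') s k hk, pv_loopB_step]
    cases h : (s.drop k).findIdx? (· = c) with
    | none => rfl
    | some p =>
      have hp : p < s.length - k := by
        have := pv_findIdx?_lt c _ _ h
        simpa [List.length_drop] using this
      have hk' : k + p + 1 ≤ s.length := by omega
      have hdd : (s.drop k).drop (p + 1) = s.drop (k + p + 1) := by
        rw [List.drop_drop]; congr 1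
      have e1 : ((k + p : Nat) : Int) + 1 = ((k + p + 1 : Nat) : Int) := by omega
      have e2 : ((k + p : Nat) : Int) = ((k + p + 1 : Nat) : Int) - 1 := by omega
      have e3 : (k : Int) + (p : Int) + 1 = ((k + p + 1 : Nat) : Int) := by omega
      simp only []
      rcases hinv with ⟨hf, hk0, hg, hq⟩ | ⟨f0, hf, hk1, hg⟩
      · rw [if_neg (show ¬((k : Int) - 1 ≠ -1) by omega)]
        subst hf
        simp only [Option.getD_none]
        rw [hdd, e1, e2, e3]
        apply ih t' (k + p + 1) hk'
        right
        refine ⟨_, rfl, by omega, ?_⟩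
        push_cast [List.length_cons] at hq ⊢
        omega
      · rw [if_pos (show ((k : Int) - 1 ≠ -1) by omega)]
        subst hf
        simp only [Option.getD_some]
        rw [hdd, e1, e2, e3]
        apply ih t' (k + p + 1) hk'
        right
        refine ⟨f0, rfl, by omega, ?_⟩
        push_cast [List.length_cons] at hg ⊢
        omega

-- ===== VERDICT (by name: the statement is the Claim_ definition above) =====
theorem subsequence_gap_py_spec : Claim_equal_subsequence_gap_py := by
  intro q s _
  unfold Spec_subsequence_gap_py subsequence_gap_py subsequence_gap_py_alt
  cases hq : q.toList with
  | nil => simp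
  | cons c qs =>
    rw [if_neg (by simp)]
    show pvLoopA (c :: qs) s.toList 0 (-1) 0 = pvLoopB s.toList 0 c qs none (PySem.Str.len q)
    have hmain := pv_main qs c s.toList 0 (by omega) none (PySem.Str.len q) 0
      (Or.inl ⟨rfl, rfl, rfl, by rw [PySem.Str.len_eq, hq]; push_cast [List.length_cons]; ring⟩)
    simpa using hmain
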